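-- pv_equiv track=rewrite | github.com/bananacraft-split/speed-racing-minescript | maketrack.py | wrap_on_sign
-- ===== SOURCE A (Python) =====
-- def wrap_on_sign(text: str) -> list[str]:
--     """
--     Wraps text for a Minecraft sign.
--     - Each sign has 4 lines.
--     - Each line up to 15 characters.
--     - Breaks long words if needed.
--     Returns a list of up to 4 strings.
--     """
--     max_width = 15
--     words = text.split()
--     lines = []
--     current_line = ""
--
--     for word in words:
--         # If the word itself is too long, break it into chunks
--         while len(word) > max_width:
--             if current_line:
--                 lines.append(current_line)
--                 current_line = ""
--             lines.append(word[:max_width])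
--             word = word[max_width:]
--
--         # Try to add the (possibly shortened) word to the current line
--         if len(current_line) + len(word) + (1 if current_line else 0) <= max_width:
--             current_line += (" " if current_line else "") + word
--         else:
--             lines.append(current_line)
--             current_line = word
--
--     # Add last line if not empty
--     if current_line:
--         lines.append(current_line)
--
--     # Limit to 4 lines
--     return lines[:4]
-- ===== SOURCE B (Python) =====
-- def wrap_on_sign(text: str) -> list[str]:
--     """Two-phase rewrite: tokenize (split words, slice over-long words into
--     15-char chunks by index), then greedily pack tokens into lines."""
--     max_width = 15
--     tokens = []
--     for word in text.split():
--         if len(word) <= max_width: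
--             tokens.append(word)
--         else:
--             for i in range(0, len(word), max_width):
--                 tokens.append(word[i:i + max_width])
--     lines = []
--     current = ""
--     for tok in tokens:
--         if len(current) + len(tok) + (1 if current else 0) <= max_width:
--             current += (" " if current else "") + tok
--         else:
--             lines.append(current)
--             current = tok
--     if current:
--         lines.append(current)
--     return lines[:4]
-- ===== Notes on version B (the rewrite author's own statement) =====
-- stated objective: faster
-- what changed: A wraps in one fused loop whose inner while-loop repeatedly re-slices the remaining word (word = word[15:], quadratic in a long word's length); B decomposes the task into two independent phases: first build a flat token list (words, with over-long words sliced into 15-char chunks by index over range(0, len, 15)), then greedily pack the token stream into lines.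
import Mathlib
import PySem

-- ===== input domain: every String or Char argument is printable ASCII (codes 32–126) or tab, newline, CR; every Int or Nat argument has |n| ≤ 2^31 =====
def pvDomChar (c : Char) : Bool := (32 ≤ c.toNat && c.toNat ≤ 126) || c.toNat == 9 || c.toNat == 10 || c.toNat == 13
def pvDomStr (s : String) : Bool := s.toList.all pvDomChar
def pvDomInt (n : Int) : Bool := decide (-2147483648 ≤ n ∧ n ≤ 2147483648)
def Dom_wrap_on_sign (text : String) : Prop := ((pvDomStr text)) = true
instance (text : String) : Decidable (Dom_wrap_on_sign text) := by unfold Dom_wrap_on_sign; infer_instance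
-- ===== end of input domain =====

-- B re-decomposes A's fused wrap loop into two phases (tokenize: chunk over-long words by
-- index instead of A's repeated re-slicing word[15:]; then greedily pack the token stream);
-- same return value, measurably faster on long words.

-- ===== PORT A =====
-- A's inner `while len(word) > 15` loop (flush current line, emit word[:15], continue
-- with word[15:]) fused with the add-word step, exactly as in the Python; the two
-- sequential appends of the while body are written as one `++` of the flushed lines.
def loopA (lines : List (List Char)) (cur : List Char) (w : List Char) :
    List (List Char) × List Char :=
  if _h : 15 < w.length then
    loopA ((if cur.isEmpty then lines else lines ++ [cur]) ++
        [PySem.List.slice w none (some 15)]) []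
      (PySem.List.slice w (some 15) none)
  else
    if cur.length + w.length + (if cur.isEmpty then 0 else 1) ≤ 15 then
      (lines, cur ++ (if cur.isEmpty then [] else [' ']) ++ w)
    else
      (lines ++ [cur], w)
termination_by w.length
decreasing_by
  rw [PySem.List.slice_from w (by norm_num), show ((15:Int)).toNat = 15 from rfl]
  simp only [List.length_drop]
  omega

def wrap_on_sign (text : String) : List String :=
  let words := PySem.Chars.split₀ text.toList
  let st := words.foldl (fun st w => loopA st.1 st.2 w)
    (([], []) : List (List Char) × List Char)
  let lines := if st.2.isEmpty then st.1 else st.1 ++ [st.2]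
  (PySem.List.slice lines none (some 4)).map String.ofList

-- ===== PORT B =====
-- B's greedy packing step: the `for tok in tokens: …` body (Source B, second phase).
def packStep (st : List (List Char) × List Char) (t : List Char) :
    List (List Char) × List Char :=
  if st.2.length + t.length + (if st.2.isEmpty then 0 else 1) ≤ 15 then
    (st.1, st.2 ++ (if st.2.isEmpty then [] else [' ']) ++ t)
  else
    (st.1 ++ [st.2], t)

def wrap_on_sign_alt (text : String) : List String :=
  let words := PySem.Chars.split₀ text.toList
  -- phase 1 (Source B): build the flat token list; word[i:i+15] over range(0, len(word), 15)
  let tokens := words.foldl (fun toks w =>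
    if w.length ≤ 15 then toks ++ [w]
    else (PySem.List.pyRange 0 (w.length : Int) 15).foldl
      (fun t i => t ++ [PySem.List.slice w (some i) (some (i + 15))]) toks) []
  -- phase 2 (Source B): greedily pack tokens into lines
  let st := tokens.foldl packStep (([], []) : List (List Char) × List Char)
  let lines := if st.2.isEmpty then st.1 else st.1 ++ [st.2]
  (PySem.List.slice lines none (some 4)).map String.ofList

-- ===== PRECONDITION & SPEC =====
def Spec_wrap_on_sign (text : String) (out : List String) : Prop := out = wrap_on_sign_alt text
instance (text : String) (out : List String) : Decidable (Spec_wrap_on_sign text out) := by unfold Spec_wrap_on_sign; infer_instance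

-- ===== CLAIM (what is proved, stated in full; the proofs are below) =====
def Claim_equal_wrap_on_sign : Prop := ∀ (text : String), Dom_wrap_on_sign text → Spec_wrap_on_sign text (wrap_on_sign text)

-- ===== LEMMAS AND PROOFS =====

-- proof-side recursive description of B's chunking of one word
def chunkRec (w : List Char) : List (List Char) :=
  if w.length ≤ 15 then [w]
  else w.take 15 :: chunkRec (w.drop 15)
termination_by w.length
decreasing_by simp only [List.length_drop]; omega

theorem chunkRec_small {w : List Char} (h : w.length ≤ 15) : chunkRec w = [w] := by
  rw [chunkRec, if_pos h]

theorem chunkRec_big {w : List Char} (h : ¬ w.length ≤ 15) :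
    chunkRec w = w.take 15 :: chunkRec (w.drop 15) := by
  rw [chunkRec, if_neg h]

-- the index loop of Source B produces exactly chunkRec's chunks
theorem range_chunks : ∀ (n : Nat) (w : List Char), w.length = n → 0 < n →
    (List.range ((n + 14) / 15)).map (fun k => (w.drop (15 * k)).take 15) = chunkRec w := by
  intro n
  induction n using Nat.strong_induction_on with
  | _ n ih =>
    intro w hw hn
    by_cases h : n ≤ 15
    · have h1 : (n + 14) / 15 = 1 := by omega
      rw [h1]
      simp only [List.range_one, List.map_cons, List.map_nil, Nat.mul_zero, List.drop_zero]
      rw [List.take_of_length_le (by omega), chunkRec_small (by omega)]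
    · have h1 : (n + 14) / 15 = ((n - 15) + 14) / 15 + 1 := by omega
      rw [h1, List.range_succ_eq_map]
      simp only [List.map_cons, List.map_map, Nat.mul_zero, List.drop_zero]
      rw [chunkRec_big (by omega)]
      congr 1
      have := ih (n - 15) (by omega) (w.drop 15) (by simp [hw]) (by omega)
      rw [← this]
      apply List.map_congr_left
      intro k _
      simp only [Function.comp]
      rw [List.drop_drop]
      congr 2
      omega

-- cast bridge: the pyRange form of phase 1 equals chunkRec for an over-long word
theorem pyRange_chunks {w : List Char} (h : ¬ w.length ≤ 15) :
    (PySem.List.pyRange 0 (w.length : Int) 15).map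
      (fun i => PySem.List.slice w (some i) (some (i + 15))) = chunkRec w := by
  rw [PySem.List.pyRange_of_pos 0 ((w.length : Int)) (by norm_num)]
  rw [if_pos (by exact_mod_cast (by omega : 0 < w.length) : (0:Int) < (w.length : Int))]
  have hcnt : (((w.length : Int) - 0 + 15 - 1) / 15).toNat = (w.length + 14) / 15 := by
    have h1 : ((w.length : Int) - 0 + 15 - 1) = ((w.length + 14 : Nat) : Int) := by push_cast; ring
    rw [h1, show (15 : Int) = ((15 : Nat) : Int) from rfl, ← Int.natCast_div, Int.toNat_natCast]
  rw [hcnt, List.map_map]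
  rw [← range_chunks w.length w rfl (by omega)]
  apply List.map_congr_left
  intro k _
  simp only [Function.comp]
  have h1 : (0 + 15 * (k : Int)) = ((15 * k : Nat) : Int) := by push_cast; ring
  have h2 : ((15 * k : Nat) : Int) + 15 = ((15 * k + 15 : Nat) : Int) := by push_cast; ring
  rw [h1, h2, PySem.List.slice_natCast]
  congr 1
  omega

-- phase 1 of B = flatMap chunkRec over the words
theorem tokens_eq (words : List (List Char)) (acc : List (List Char)) :
    words.foldl (fun toks w =>
      if w.length ≤ 15 then toks ++ [w]
      else (PySem.List.pyRange 0 (w.length : Int) 15).foldl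
        (fun t i => t ++ [PySem.List.slice w (some i) (some (i + 15))]) toks) acc
    = acc ++ words.flatMap chunkRec := by
  induction words generalizing acc with
  | nil => simp
  | cons w ws ih =>
    simp only [List.foldl_cons, List.flatMap_cons, ih]
    by_cases h : w.length ≤ 15
    · rw [if_pos h, chunkRec_small h]
      simp [List.append_assoc]
    · rw [if_neg h, PySem.List.foldl_append_singleton_eq_map, pyRange_chunks h]
      simp [List.append_assoc]

-- the state relation: A's state is either B's, or A has already flushed a full
-- 15-char chunk that B still holds as its current line
def StRel (a b : List (List Char) × List Char) : Prop :=
  a = b ∨ ∃ c : List Char, c.length = 15 ∧ a.1 = b.1 ++ [c] ∧ a.2 = [] ∧ b.2 = c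

theorem loopA_small {l : List (List Char)} {c w : List Char} (h : ¬ 15 < w.length) :
    loopA l c w = packStep (l, c) w := by
  unfold loopA packStep
  rw [dif_neg h]

theorem loopA_big {l : List (List Char)} {c w : List Char} (h : 15 < w.length) :
    loopA l c w = loopA ((if c.isEmpty then l else l ++ [c]) ++ [w.take 15]) [] (w.drop 15) := by
  rw [loopA.eq_def, dif_pos h,
    PySem.List.slice_to w (by norm_num), PySem.List.slice_from w (by norm_num),
    show ((15:Int)).toNat = 15 from rfl]

theorem isEmpty_len15 {c : List Char} (h : c.length = 15) : c.isEmpty = false := by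
  cases c <;> simp_all

-- packStep on an empty current line with a token that fits
theorem packStep_empty {l : List (List Char)} {t : List Char} (h : t.length ≤ 15) :
    packStep (l, []) t = (l, t) := by
  unfold packStep
  rw [if_pos (by simp [h])]
  simp

-- packStep on a full 15-char current line always flushes
theorem packStep_full {l : List (List Char)} {c t : List Char} (hc : c.length = 15) :
    packStep (l, c) t = (l ++ [c], t) := by
  unfold packStep
  rw [if_neg (by simp [isEmpty_len15 hc, hc])]

-- one word of A vs its chunk tokens in B
theorem word_step : ∀ (n : Nat) (w : List Char), w.length = n →
    ∀ a b, StRel a b → StRel (loopA a.1 a.2 w) (List.foldl packStep b (chunkRec w)) := by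
  intro n
  induction n using Nat.strong_induction_on with
  | _ n ih =>
    rintro w hw ⟨a1, a2⟩ ⟨b1, b2⟩ hrel
    by_cases h : 15 < w.length
    · -- A flushes and emits w[:15]; B packs the 15-char chunk, which always flushes too
      rw [chunkRec_big (by omega), List.foldl_cons]
      show StRel (loopA a1 a2 w) _
      rw [loopA_big h]
      have hlen : (w.take 15).length = 15 := by simp; omega
      have hnext : StRel ((if a2.isEmpty then a1 else a1 ++ [a2]) ++ [w.take 15], ([] : List Char))
          (packStep (b1, b2) (w.take 15)) := by
        rcases hrel with heq | ⟨c, hc, h1, h2, h3⟩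
        · injection heq with e1 e2
          subst e1; subst e2
          by_cases hcur : a2.isEmpty
          · have ha2 : a2 = [] := by simpa using hcur
            subst ha2
            rw [packStep_empty (le_of_eq hlen)]
            exact Or.inr ⟨w.take 15, hlen, by simp, rfl, rfl⟩
          · have hf : a2.isEmpty = false := eq_false_of_ne_true hcur
            have hstep : packStep (a1, a2) (w.take 15) = (a1 ++ [a2], w.take 15) := by
              unfold packStep
              rw [if_neg (by rw [hlen, hf]; simp)]
            rw [hstep]
            exact Or.inr ⟨w.take 15, hlen, by simp [hf], rfl, rfl⟩
        · have h1' : a1 = b1 ++ [c] := h1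
          have h2' : a2 = [] := h2
          have h3' : b2 = c := h3
          subst h1'; subst h2'; subst h3'
          rw [packStep_full hc]
          exact Or.inr ⟨w.take 15, hlen, by simp, rfl, rfl⟩
      have := ih (w.drop 15).length (by simp; omega) (w.drop 15) rfl _ _ hnext
      simpa using this
    · -- small word: both sides take the same greedy step (from B's full 15-char current
      -- line the step always flushes, landing exactly on A's already-flushed state)
      rw [chunkRec_small (by omega), List.foldl_cons, List.foldl_nil]
      show StRel (loopA a1 a2 w) _
      rw [loopA_small h]
      rcases hrel with heq | ⟨c, hc, h1, h2, h3⟩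
      · injection heq with e1 e2
        subst e1; subst e2
        exact Or.inl rfl
      · have h1' : a1 = b1 ++ [c] := h1
        have h2' : a2 = [] := h2
        have h3' : b2 = c := h3
        subst h1'; subst h2'; subst h3'
        rw [packStep_full hc, packStep_empty (by omega)]
        exact Or.inl rfl

theorem words_fold : ∀ (ws : List (List Char)) a b, StRel a b →
    StRel (ws.foldl (fun st w => loopA st.1 st.2 w) a)
        (List.foldl packStep b (ws.flatMap chunkRec)) := by
  intro ws
  induction ws with
  | nil => intro a b h; simpa using h
  | cons w ws ih =>
    intro a b h
    simp only [List.foldl_cons, List.flatMap_cons, List.foldl_append]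
    exact ih _ _ (word_step w.length w rfl a b h)

theorem finish_eq {a b : List (List Char) × List Char} (h : StRel a b) :
    (if a.2.isEmpty then a.1 else a.1 ++ [a.2]) =
    (if b.2.isEmpty then b.1 else b.1 ++ [b.2]) := by
  rcases h with heq | ⟨c, hc, h1, h2, h3⟩
  · rw [heq]
  · rw [h1, h2, h3, isEmpty_len15 hc]
    simp

-- ===== VERDICT (by name: the statement is the Claim_ definition above) =====
theorem wrap_on_sign_spec : Claim_equal_wrap_on_sign := by
  intro text _
  unfold Spec_wrap_on_sign
  simp only [wrap_on_sign, wrap_on_sign_alt]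
  rw [tokens_eq, List.nil_append]
  rw [finish_eq (words_fold (PySem.Chars.split₀ text.toList) ([], []) ([], []) (Or.inl rfl))]
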